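-- pv_equiv track=rewrite | github.com/bpandola/advent-of-code | 2016/day_02.py | get_bathroom_code
-- ===== SOURCE A (Python) =====
-- def build_direction_map(keypad_layout):
--     coord_to_key = {}
--     key_to_coord = {}
--     y = 0
--     for row in keypad_layout:
--         x = 0
--         for key in row:
--             if key != ' ':
--                 coord_to_key[(x, y)] = key
--                 key_to_coord[key] = (x, y)
--             x += 1
--         y += 1
--     direction_map = {}
--     for key, location in key_to_coord.items():
--         x, y = location
--         direction_map[key] = {
--             'L': coord_to_key.get((x - 1, y), key),
--             'R': coord_to_key.get((x + 1, y), key),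
--             'U': coord_to_key.get((x, y - 1), key),
--             'D': coord_to_key.get((x, y + 1), key),
--         }
--     return direction_map
--
-- def get_bathroom_code(instructions, keypad_layout, starting_key):
--     direction_map = build_direction_map(keypad_layout)
--     current_key = starting_key
--     bathroom_code = ''
--     for sequence in instructions:
--         for direction in sequence:
--             current_key = direction_map[current_key][direction]
--         bathroom_code += current_key
--     return bathroom_code
-- ===== SOURCE B (Python) =====
-- def get_bathroom_code(instructions, keypad_layout, starting_key):
--     coord_to_key = {}
--     key_to_coord = {}
--     for y, row in enumerate(keypad_layout):
--         for x, key in enumerate(row):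
--             if key != ' ':
--                 coord_to_key[(x, y)] = key
--                 key_to_coord[key] = (x, y)
--     deltas = {'L': (-1, 0), 'R': (1, 0), 'U': (0, -1), 'D': (0, 1)}
--     current = starting_key
--     code = []
--     for sequence in instructions:
--         for direction in sequence:
--             x, y = key_to_coord[current]
--             dx, dy = deltas[direction]
--             candidate = coord_to_key.get((x + dx, y + dy))
--             if candidate is not None:
--                 current = candidate
--         code.append(current)
--     return ''.join(code)
-- ===== Notes on version B (the rewrite author's own statement) =====
-- stated objective: simpler
-- what changed: B drops A's precomputed per-key direction_map entirely and instead tracks the walk on coordinates with a delta table, looking up neighbours in coord_to_key on the fly.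
import Mathlib
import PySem

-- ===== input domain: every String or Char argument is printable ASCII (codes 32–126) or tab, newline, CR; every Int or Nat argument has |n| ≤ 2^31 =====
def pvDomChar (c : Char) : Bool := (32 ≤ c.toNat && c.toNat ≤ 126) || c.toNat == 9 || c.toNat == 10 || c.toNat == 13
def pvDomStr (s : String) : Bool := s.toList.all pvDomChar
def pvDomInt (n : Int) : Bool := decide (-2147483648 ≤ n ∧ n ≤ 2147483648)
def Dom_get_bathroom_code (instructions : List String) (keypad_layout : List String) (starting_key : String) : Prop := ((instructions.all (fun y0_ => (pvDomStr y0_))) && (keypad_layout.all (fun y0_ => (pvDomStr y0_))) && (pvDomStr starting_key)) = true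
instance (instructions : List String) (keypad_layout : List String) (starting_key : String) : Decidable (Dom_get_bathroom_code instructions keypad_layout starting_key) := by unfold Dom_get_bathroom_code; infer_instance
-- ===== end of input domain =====

-- B replaces A's precomputed per-key direction_map by tracking the walk on coordinates with a
-- delta table and on-the-fly neighbour lookups in coord_to_key (objective: simpler).

-- ===== PORT A =====
-- A builds coord_to_key / key_to_coord with explicit x/y counters (build_direction_map's first loop)
def pvStepKeyA (y : Int)
    (s : PySem.Dict (Int × Int) String × PySem.Dict String (Int × Int) × Int) (key : Char) :
    PySem.Dict (Int × Int) String × PySem.Dict String (Int × Int) × Int :=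
  if key ≠ ' ' then
    (s.1.insert (s.2.2, y) (String.ofList [key]), s.2.1.insert (String.ofList [key]) (s.2.2, y), s.2.2 + 1)
  else (s.1, s.2.1, s.2.2 + 1)

def pvStepRowA (st : PySem.Dict (Int × Int) String × PySem.Dict String (Int × Int) × Int)
    (row : String) : PySem.Dict (Int × Int) String × PySem.Dict String (Int × Int) × Int :=
  let inner := row.toList.foldl (pvStepKeyA st.2.2) (st.1, st.2.1, 0)
  (inner.1, inner.2.1, st.2.2 + 1)

def pvCoordMapsA (keypad_layout : List String) :
    PySem.Dict (Int × Int) String × PySem.Dict String (Int × Int) :=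
  let st := keypad_layout.foldl pvStepRowA (PySem.Dict.empty, PySem.Dict.empty, 0)
  (st.1, st.2.1)

-- the dict literal {'L': …, 'R': …, 'U': …, 'D': …} built for one key
def pvDirEntry (ctk : PySem.Dict (Int × Int) String) (key : String) (x y : Int) :
    PySem.Dict Char String :=
  PySem.Dict.ofList
    [('L', ctk.getD (x - 1, y) key), ('R', ctk.getD (x + 1, y) key),
     ('U', ctk.getD (x, y - 1) key), ('D', ctk.getD (x, y + 1) key)]

def pvDirectionMap (keypad_layout : List String) : PySem.Dict String (PySem.Dict Char String) :=
  let maps := pvCoordMapsA keypad_layout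
  maps.2.items.foldl
    (fun dm kv => dm.insert kv.1 (pvDirEntry maps.1 kv.1 kv.2.1 kv.2.2))
    PySem.Dict.empty

-- direction_map[current_key][direction]: Python raises KeyError on a missing key; those inputs are
-- excluded by Pre_, the getD fallbacks are never reached inside Pre_.
def pvMoveA (dm : PySem.Dict String (PySem.Dict Char String)) (cur : String) (direction : Char) :
    String :=
  (dm.getD cur PySem.Dict.empty).getD direction cur

def pvSeqA (dm : PySem.Dict String (PySem.Dict Char String)) (s : String × List Char)
    (sequence : String) : String × List Char :=
  let cur := sequence.toList.foldl (pvMoveA dm) s.1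
  (cur, s.2 ++ cur.toList)

def get_bathroom_code (instructions : List String) (keypad_layout : List String)
    (starting_key : String) : String :=
  let dm := pvDirectionMap keypad_layout
  String.ofList ((instructions.foldl (pvSeqA dm) (starting_key, [])).2)

-- ===== PORT B =====
-- B builds the same two coordinate maps with enumerate, and no direction_map
def pvStepKeyB (y : Int) (m : PySem.Dict (Int × Int) String × PySem.Dict String (Int × Int))
    (xkey : Int × Char) : PySem.Dict (Int × Int) String × PySem.Dict String (Int × Int) :=
  if xkey.2 ≠ ' ' then
    (m.1.insert (xkey.1, y) (String.ofList [xkey.2]), m.2.insert (String.ofList [xkey.2]) (xkey.1, y))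
  else m

def pvStepRowB (m : PySem.Dict (Int × Int) String × PySem.Dict String (Int × Int))
    (yrow : Int × String) : PySem.Dict (Int × Int) String × PySem.Dict String (Int × Int) :=
  (PySem.List.enumerate yrow.2.toList 0).foldl (pvStepKeyB yrow.1) m

def pvCoordMapsB (keypad_layout : List String) :
    PySem.Dict (Int × Int) String × PySem.Dict String (Int × Int) :=
  (PySem.List.enumerate keypad_layout 0).foldl pvStepRowB (PySem.Dict.empty, PySem.Dict.empty)

def pvDeltas : PySem.Dict Char (Int × Int) :=
  PySem.Dict.ofList [('L', (-1, 0)), ('R', (1, 0)), ('U', (0, -1)), ('D', (0, 1))]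

-- key_to_coord[current] / deltas[direction] raise KeyError in Python on a missing key; those
-- inputs are excluded by Pre_, the getD fallbacks are never reached inside Pre_.
def pvMoveB (mp : PySem.Dict (Int × Int) String × PySem.Dict String (Int × Int)) (cur : String)
    (direction : Char) : String :=
  let xy := mp.2.getD cur (0, 0)
  let dd := pvDeltas.getD direction (0, 0)
  match mp.1.get? (xy.1 + dd.1, xy.2 + dd.2) with
  | some k => k
  | none => cur

def pvSeqB (mp : PySem.Dict (Int × Int) String × PySem.Dict String (Int × Int))
    (s : String × List Char) (sequence : String) : String × List Char :=
  let cur := sequence.toList.foldl (pvMoveB mp) s.1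
  (cur, s.2 ++ cur.toList)

def get_bathroom_code_alt (instructions : List String) (keypad_layout : List String)
    (starting_key : String) : String :=
  let mp := pvCoordMapsB keypad_layout
  String.ofList ((instructions.foldl (pvSeqB mp) (starting_key, [])).2)

-- ===== PRECONDITION & SPEC =====
-- Pre_ is exactly where Python A returns: every direction character is L/R/U/D, and either the
-- starting key is a (single-character, non-space) key of the keypad or no move is ever attempted
-- (all sequences empty); everywhere else A raises KeyError.
def Pre_get_bathroom_code (instructions : List String) (keypad_layout : List String)
    (starting_key : String) : Prop :=
  (instructions.all fun s => s.toList.all fun c =>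
    c == 'L' || c == 'R' || c == 'U' || c == 'D') = true ∧
  ((keypad_layout.any fun row => row.toList.any fun c =>
      !(c == ' ') && starting_key == String.ofList [c]) = true ∨
   (instructions.all fun s => s.toList.isEmpty) = true)

instance (instructions : List String) (keypad_layout : List String) (starting_key : String) :
    Decidable (Pre_get_bathroom_code instructions keypad_layout starting_key) := by
  unfold Pre_get_bathroom_code; infer_instance

def pvWitness_get_bathroom_code : List String × List String × String :=
  (["ULL", "RR"], ["123", "456", "789"], "5")

def Spec_get_bathroom_code (instructions : List String) (keypad_layout : List String) (starting_key : String) (out : String) : Prop := out = get_bathroom_code_alt instructions keypad_layout starting_key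
instance (instructions : List String) (keypad_layout : List String) (starting_key : String) (out : String) : Decidable (Spec_get_bathroom_code instructions keypad_layout starting_key out) := by unfold Spec_get_bathroom_code; infer_instance

-- ===== CLAIM (what is proved, stated in full; the proofs are below) =====
def Claim_equal_get_bathroom_code : Prop := ∀ (instructions : List String) (keypad_layout : List String) (starting_key : String), Dom_get_bathroom_code instructions keypad_layout starting_key → Pre_get_bathroom_code instructions keypad_layout starting_key → Spec_get_bathroom_code instructions keypad_layout starting_key (get_bathroom_code instructions keypad_layout starting_key)

-- ===== LEMMAS AND PROOFS =====

-- The two builds produce the same pair of dictionaries.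
lemma pvInner_eq (cs : List Char) (y : Int) :
    ∀ (ctk : PySem.Dict (Int × Int) String) (ktc : PySem.Dict String (Int × Int)) (x : Int),
      cs.foldl (pvStepKeyA y) (ctk, ktc, x) =
        (((PySem.List.enumerate cs x).foldl (pvStepKeyB y) (ctk, ktc)).1,
         ((PySem.List.enumerate cs x).foldl (pvStepKeyB y) (ctk, ktc)).2,
         x + cs.length) := by
  induction cs with
  | nil => intro ctk ktc x; simp [PySem.List.enumerate_nil]
  | cons c cs ih =>
    intro ctk ktc x
    rw [PySem.List.enumerate_cons]
    simp only [List.foldl_cons]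
    have hstep : pvStepKeyA y (ctk, ktc, x) c =
        ((pvStepKeyB y (ctk, ktc) (x, c)).1, (pvStepKeyB y (ctk, ktc) (x, c)).2, x + 1) := by
      simp only [pvStepKeyA, pvStepKeyB]; split <;> rfl
    rw [hstep, ih]
    obtain ⟨m1, m2⟩ := pvStepKeyB y (ctk, ktc) (x, c)
    simp; omega

lemma pvOuter_eq (rows : List String) :
    ∀ (ctk : PySem.Dict (Int × Int) String) (ktc : PySem.Dict String (Int × Int)) (y : Int),
      rows.foldl pvStepRowA (ctk, ktc, y) =
        (((PySem.List.enumerate rows y).foldl pvStepRowB (ctk, ktc)).1,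
         ((PySem.List.enumerate rows y).foldl pvStepRowB (ctk, ktc)).2,
         y + rows.length) := by
  induction rows with
  | nil => intro ctk ktc y; simp [PySem.List.enumerate_nil]
  | cons row rows ih =>
    intro ctk ktc y
    rw [PySem.List.enumerate_cons]
    simp only [List.foldl_cons]
    have hstep : pvStepRowA (ctk, ktc, y) row =
        ((pvStepRowB (ctk, ktc) (y, row)).1, (pvStepRowB (ctk, ktc) (y, row)).2, y + 1) := by
      simp only [pvStepRowA, pvStepRowB, pvInner_eq]
    rw [hstep, ih]
    obtain ⟨m1, m2⟩ := pvStepRowB (ctk, ktc) (y, row)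
    simp; omega

lemma pvCoordMaps_eq (kl : List String) : pvCoordMapsA kl = pvCoordMapsB kl := by
  simp only [pvCoordMapsA, pvCoordMapsB, pvOuter_eq]

-- Invariant of the build: key_to_coord has unique keys, and every value of coord_to_key is a key
-- of key_to_coord.
def pvInv (m : PySem.Dict (Int × Int) String × PySem.Dict String (Int × Int)) : Prop :=
  m.2.keys.Nodup ∧ ∀ p k, m.1.get? p = some k → m.2.contains k = true

lemma pvInv_stepKey (y : Int) (m : PySem.Dict (Int × Int) String × PySem.Dict String (Int × Int))
    (xk : Int × Char) (h : pvInv m) : pvInv (pvStepKeyB y m xk) := by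
  obtain ⟨hnd, hval⟩ := h
  simp only [pvStepKeyB]
  split
  · refine ⟨PySem.Dict.nodup_keys_insert _ _ _ hnd, ?_⟩
    intro p k hk
    rw [PySem.Dict.get?_insert] at hk
    rw [PySem.Dict.contains_insert]
    split at hk
    · cases hk; simp
    · simp [hval _ _ hk]
  · exact ⟨hnd, hval⟩

lemma pvInv_foldKey (y : Int) (l : List (Int × Char)) :
    ∀ m, pvInv m → pvInv (l.foldl (pvStepKeyB y) m) := by
  induction l with
  | nil => intro m h; exact h
  | cons a l ih => intro m h; exact ih _ (pvInv_stepKey y m a h)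

lemma pvInv_foldRow (l : List (Int × String)) :
    ∀ m, pvInv m → pvInv (l.foldl pvStepRowB m) := by
  induction l with
  | nil => intro m h; exact h
  | cons a l ih => intro m h; exact ih _ (pvInv_foldKey a.1 _ m h)

lemma pvInv_maps (kl : List String) : pvInv (pvCoordMapsB kl) := by
  refine pvInv_foldRow _ _ ⟨PySem.Dict.nodup_keys_empty, ?_⟩
  intro p k h
  rw [PySem.Dict.get?_empty] at h
  cases h

-- key_to_coord membership is monotone along the build and holds after the inserting step
lemma pvContains_stepKey (y : Int) (m : PySem.Dict (Int × Int) String × PySem.Dict String (Int × Int))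
    (xk : Int × Char) (k : String) (h : m.2.contains k = true) :
    (pvStepKeyB y m xk).2.contains k = true := by
  simp only [pvStepKeyB]
  split
  · rw [PySem.Dict.contains_insert]; simp [h]
  · exact h

lemma pvContains_foldKey (y : Int) (l : List (Int × Char)) :
    ∀ m k, m.2.contains k = true → (l.foldl (pvStepKeyB y) m).2.contains k = true := by
  induction l with
  | nil => intro m k h; exact h
  | cons a l ih => intro m k h; exact ih _ _ (pvContains_stepKey y m a k h)

lemma pvContains_foldRow (l : List (Int × String)) :
    ∀ m k, m.2.contains k = true → (l.foldl pvStepRowB m).2.contains k = true := by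
  induction l with
  | nil => intro m k h; exact h
  | cons a l ih => intro m k h; exact ih _ _ (pvContains_foldKey a.1 _ m k h)

lemma pvContains_row (row : String) (y : Int)
    (m : PySem.Dict (Int × Int) String × PySem.Dict String (Int × Int)) (c : Char)
    (hc : c ∈ row.toList) (hsp : c ≠ ' ') :
    (pvStepRowB m (y, row)).2.contains (String.ofList [c]) = true := by
  obtain ⟨l1, l2, hsplit⟩ := List.append_of_mem hc
  simp only [pvStepRowB]
  rw [hsplit, PySem.List.enumerate_append, List.foldl_append, PySem.List.enumerate_cons,
    List.foldl_cons]
  apply pvContains_foldKey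
  simp only [pvStepKeyB]
  rw [if_pos hsp]
  exact PySem.Dict.contains_insert_self _ _ _

lemma pvContains_start (kl : List String) (sk : String)
    (h : ∃ row ∈ kl, ∃ c ∈ row.toList, c ≠ ' ' ∧ sk = String.ofList [c]) :
    (pvCoordMapsB kl).2.contains sk = true := by
  obtain ⟨row, hrow, c, hc, hsp, rfl⟩ := h
  obtain ⟨l1, l2, hsplit⟩ := List.append_of_mem hrow
  simp only [pvCoordMapsB]
  rw [hsplit, PySem.List.enumerate_append, List.foldl_append, PySem.List.enumerate_cons,
    List.foldl_cons]
  exact pvContains_foldRow _ _ _ (pvContains_row row _ _ c hc hsp)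

-- looking up a key of key_to_coord in A's direction_map yields its pvDirEntry
lemma pvDirMap_getD (kl : List String) (cur : String) (xy : Int × Int)
    (hget : (pvCoordMapsB kl).2.get? cur = some xy) :
    (pvDirectionMap kl).getD cur PySem.Dict.empty =
      pvDirEntry (pvCoordMapsB kl).1 cur xy.1 xy.2 := by
  have hnd : (pvCoordMapsB kl).2.keys.Nodup := (pvInv_maps kl).1
  have hitems : (pvDirectionMap kl).items =
      (pvCoordMapsB kl).2.items.map
        (fun kv => (kv.1, pvDirEntry (pvCoordMapsB kl).1 kv.1 kv.2.1 kv.2.2)) := by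
    simp only [pvDirectionMap, pvCoordMaps_eq]
    have hfresh := PySem.Dict.items_foldl_insert_fresh (pvCoordMapsB kl).2.items
      (fun kv => kv.1) (fun kv => pvDirEntry (pvCoordMapsB kl).1 kv.1 kv.2.1 kv.2.2)
      PySem.Dict.empty (fun a _ => PySem.Dict.contains_empty _)
      (by simpa [PySem.Dict.keys] using hnd)
    simpa [PySem.Dict.empty] using hfresh
  have hndDm : (pvDirectionMap kl).keys.Nodup := by
    have hkeys : (pvDirectionMap kl).keys = (pvCoordMapsB kl).2.keys := by
      simp only [PySem.Dict.keys, hitems, List.map_map]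
      rfl
    rw [hkeys]; exact hnd
  have hmem : (cur, pvDirEntry (pvCoordMapsB kl).1 cur xy.1 xy.2) ∈
      (pvDirectionMap kl).items := by
    rw [hitems]
    exact List.mem_map_of_mem (PySem.Dict.mem_items_of_get?_eq_some _ hget)
  exact PySem.Dict.getD_of_mem_items _ hmem hndDm _

-- B's move reduces to a coord_to_key.getD at the shifted coordinate
lemma pvMoveB_getD (mp : PySem.Dict (Int × Int) String × PySem.Dict String (Int × Int))
    (cur : String) (d : Char) (xy t : Int × Int) (hgetD : mp.2.getD cur (0, 0) = xy)
    (ht : (xy.1 + (pvDeltas.getD d (0, 0)).1, xy.2 + (pvDeltas.getD d (0, 0)).2) = t) :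
    pvMoveB mp cur d = mp.1.getD t cur := by
  simp only [pvMoveB, hgetD]
  rw [ht, PySem.Dict.getD_eq_get?_getD]
  cases hkk : mp.1.get? t with
  | none => rfl
  | some k => rfl

-- one move: A's direction_map lookup equals B's coordinate step, and validity is preserved
lemma pvMove_eq (kl : List String) (cur : String) (d : Char)
    (hc : (pvCoordMapsB kl).2.contains cur = true)
    (hd : d = 'L' ∨ d = 'R' ∨ d = 'U' ∨ d = 'D') :
    pvMoveA (pvDirectionMap kl) cur d = pvMoveB (pvCoordMapsB kl) cur d ∧
    (pvCoordMapsB kl).2.contains (pvMoveB (pvCoordMapsB kl) cur d) = true := by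
  obtain ⟨xy, hget⟩ : ∃ xy, (pvCoordMapsB kl).2.get? cur = some xy := by
    rw [PySem.Dict.contains_eq_isSome_get?] at hc
    exact Option.isSome_iff_exists.mp hc
  have hA := pvDirMap_getD kl cur xy hget
  have hgetD : (pvCoordMapsB kl).2.getD cur (0, 0) = xy :=
    PySem.Dict.getD_of_get?_eq_some _ _ hget
  have hval := (pvInv_maps kl).2
  have hfin : ∀ t : Int × Int, pvMoveB (pvCoordMapsB kl) cur d = (pvCoordMapsB kl).1.getD t cur →
      (pvCoordMapsB kl).2.contains (pvMoveB (pvCoordMapsB kl) cur d) = true := by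
    intro t hB
    rw [hB, PySem.Dict.getD_eq_get?_getD]
    cases hkk : (pvCoordMapsB kl).1.get? t with
    | none => exact hc
    | some k => exact hval _ _ hkk
  rcases hd with rfl | rfl | rfl | rfl
  · have hB := pvMoveB_getD _ cur 'L' xy (xy.1 - 1, xy.2) hgetD
      (by rw [(by decide : pvDeltas.getD 'L' ((0 : Int), (0 : Int)) = (-1, 0)), Prod.ext_iff]
          exact ⟨by ring, by ring⟩)
    refine ⟨?_, hfin _ hB⟩
    rw [hB]
    simp only [pvMoveA, hA]
    simp [pvDirEntry, PySem.Dict.ofList, PySem.Dict.update, PySem.Dict.getD_insert]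
  · have hB := pvMoveB_getD _ cur 'R' xy (xy.1 + 1, xy.2) hgetD
      (by rw [(by decide : pvDeltas.getD 'R' ((0 : Int), (0 : Int)) = (1, 0)), Prod.ext_iff]
          exact ⟨by ring, by ring⟩)
    refine ⟨?_, hfin _ hB⟩
    rw [hB]
    simp only [pvMoveA, hA]
    simp [pvDirEntry, PySem.Dict.ofList, PySem.Dict.update, PySem.Dict.getD_insert]
  · have hB := pvMoveB_getD _ cur 'U' xy (xy.1, xy.2 - 1) hgetD
      (by rw [(by decide : pvDeltas.getD 'U' ((0 : Int), (0 : Int)) = (0, -1)), Prod.ext_iff]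
          exact ⟨by ring, by ring⟩)
    refine ⟨?_, hfin _ hB⟩
    rw [hB]
    simp only [pvMoveA, hA]
    simp [pvDirEntry, PySem.Dict.ofList, PySem.Dict.update, PySem.Dict.getD_insert]
  · have hB := pvMoveB_getD _ cur 'D' xy (xy.1, xy.2 + 1) hgetD
      (by rw [(by decide : pvDeltas.getD 'D' ((0 : Int), (0 : Int)) = (0, 1)), Prod.ext_iff]
          exact ⟨by ring, by ring⟩)
    refine ⟨?_, hfin _ hB⟩
    rw [hB]
    simp only [pvMoveA, hA]
    simp [pvDirEntry, PySem.Dict.ofList, PySem.Dict.update]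

lemma pvSeqFold_eq (kl : List String) (cs : List Char) :
    ∀ cur, (∀ c ∈ cs, c = 'L' ∨ c = 'R' ∨ c = 'U' ∨ c = 'D') →
      (pvCoordMapsB kl).2.contains cur = true →
      cs.foldl (pvMoveA (pvDirectionMap kl)) cur = cs.foldl (pvMoveB (pvCoordMapsB kl)) cur ∧
      (pvCoordMapsB kl).2.contains (cs.foldl (pvMoveB (pvCoordMapsB kl)) cur) = true := by
  induction cs with
  | nil => intro cur _ hc; exact ⟨rfl, hc⟩
  | cons c cs ih =>
    intro cur hall hc
    obtain ⟨heq, hcont⟩ := pvMove_eq kl cur c hc (hall c List.mem_cons_self)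
    simp only [List.foldl_cons, heq]
    exact ih _ (fun x hx => hall x (List.mem_cons_of_mem _ hx)) hcont

lemma pvMain_eq (kl : List String) (instrs : List String) :
    ∀ (cur : String) (acc : List Char),
      (∀ s ∈ instrs, ∀ c ∈ s.toList, c = 'L' ∨ c = 'R' ∨ c = 'U' ∨ c = 'D') →
      ((pvCoordMapsB kl).2.contains cur = true ∨ ∀ s ∈ instrs, s.toList = ([] : List Char)) →
      instrs.foldl (pvSeqA (pvDirectionMap kl)) (cur, acc) =
        instrs.foldl (pvSeqB (pvCoordMapsB kl)) (cur, acc) := by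
  induction instrs with
  | nil => intro cur acc _ _; rfl
  | cons s instrs ih =>
    intro cur acc hch hv
    simp only [List.foldl_cons, pvSeqA, pvSeqB]
    by_cases hs : s.toList = ([] : List Char)
    · rw [hs]
      simp only [List.foldl_nil]
      refine ih _ _ (fun t ht => hch t (List.mem_cons_of_mem _ ht)) ?_
      rcases hv with h | h
      · exact Or.inl h
      · exact Or.inr fun t ht => h t (List.mem_cons_of_mem _ ht)
    · have hcur : (pvCoordMapsB kl).2.contains cur = true := by
        rcases hv with h | h
        · exact h
        · exact absurd (h s List.mem_cons_self) hs
      obtain ⟨heq, hcont⟩ :=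
        pvSeqFold_eq kl s.toList cur (hch s List.mem_cons_self) hcur
      rw [heq]
      exact ih _ _ (fun t ht => hch t (List.mem_cons_of_mem _ ht)) (Or.inl hcont)

-- ===== VERDICT (by name: the statement is the Claim_ definition above) =====
theorem get_bathroom_code_spec : Claim_equal_get_bathroom_code := by
  intro instructions keypad_layout starting_key _ hpre
  obtain ⟨hch, hv⟩ := hpre
  simp only [List.all_eq_true, Bool.or_eq_true, beq_iff_eq, or_assoc] at hch
  simp only [List.any_eq_true, List.all_eq_true, Bool.and_eq_true, Bool.not_eq_true',
    beq_iff_eq, beq_eq_false_iff_ne, List.isEmpty_iff] at hv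
  unfold Spec_get_bathroom_code get_bathroom_code get_bathroom_code_alt
  have hv' : (pvCoordMapsB keypad_layout).2.contains starting_key = true ∨
      ∀ s ∈ instructions, s.toList = ([] : List Char) := by
    rcases hv with h | h
    · exact Or.inl (pvContains_start keypad_layout starting_key h)
    · exact Or.inr h
  show String.ofList ((instructions.foldl (pvSeqA (pvDirectionMap keypad_layout))
      (starting_key, [])).2) =
    String.ofList ((instructions.foldl (pvSeqB (pvCoordMapsB keypad_layout))
      (starting_key, [])).2)
  rw [pvMain_eq keypad_layout instructions starting_key [] hch hv']
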